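-- pv_equiv track=rewrite | github.com/hopegrace/Xiaomi_OJ | 3_medium/41_coin_sorting.py | solution
-- ===== SOURCE A (Python) =====
-- def solution(line):
--     res = [0] * 3
--     for item in line.strip():
--         if item == "a":
--             res[0] += 1
--         elif item == "b":
--             res[1] += 1
--         else:
--             res[2] += 1
--     ans = "a" * res[0] + "b" * res[1] + "c" * res[2]
--     return ans
-- ===== SOURCE B (Python) =====
-- def solution(line):
--     return ''.join(sorted('a' if ch == 'a' else 'b' if ch == 'b' else 'c'
--                           for ch in line.strip()))
-- ===== Notes on version B (the rewrite author's own statement) =====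
-- stated objective: alternative
-- what changed: Instead of counting characters into a 3-cell array and concatenating repeated runs, B normalises every character of the stripped line to 'a'/'b'/'c' (non-a/b characters become 'c', matching A's else branch) and sorts the normalised characters; since 'a'<'b'<'c', the sorted string is exactly the a-run, b-run, c-run.
import Mathlib
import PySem

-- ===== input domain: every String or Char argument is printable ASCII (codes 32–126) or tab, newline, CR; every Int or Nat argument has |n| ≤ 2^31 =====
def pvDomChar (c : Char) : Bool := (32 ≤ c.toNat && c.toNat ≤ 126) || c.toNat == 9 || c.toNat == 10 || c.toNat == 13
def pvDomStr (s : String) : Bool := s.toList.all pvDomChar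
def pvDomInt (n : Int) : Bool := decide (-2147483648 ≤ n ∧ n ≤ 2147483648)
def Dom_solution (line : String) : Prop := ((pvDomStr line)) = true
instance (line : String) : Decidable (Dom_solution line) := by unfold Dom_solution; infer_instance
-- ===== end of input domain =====

-- B normalises every stripped character to 'a'/'b'/'c' and sorts, instead of counting
-- into a 3-cell array and concatenating repeated runs (alternative algorithm, same result).

-- ===== PORT A =====
-- res = [0]*3 becomes the triple (res0, res1, res2) of Int counters, updated by the same branches.
def solution (line : String) : String :=
  let res := (PySem.Str.strip line).toList.foldl
    (fun (r : Int × Int × Int) item =>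
      if item == 'a' then (r.1 + 1, r.2.1, r.2.2)
      else if item == 'b' then (r.1, r.2.1 + 1, r.2.2)
      else (r.1, r.2.1, r.2.2 + 1))
    (0, 0, 0)
  String.mk (PySem.List.pyRepeat ['a'] res.1 ++ PySem.List.pyRepeat ['b'] res.2.1
              ++ PySem.List.pyRepeat ['c'] res.2.2)

-- ===== PORT B =====
-- ''.join(sorted(generator)) : map each stripped char to its normal form, sort, rebuild the string.
def solution_alt (line : String) : String :=
  String.mk (PySem.List.sorted
    ((PySem.Str.strip line).toList.map
      (fun ch => if ch == 'a' then 'a' else if ch == 'b' then 'b' else 'c'))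
    (fun x => x) false)

-- ===== PRECONDITION & SPEC =====
def Spec_solution (line : String) (out : String) : Prop := out = solution_alt line
instance (line : String) (out : String) : Decidable (Spec_solution line out) := by unfold Spec_solution; infer_instance

-- ===== CLAIM (what is proved, stated in full; the proofs are below) =====
def Claim_equal_solution : Prop := ∀ (line : String), Dom_solution line → Spec_solution line (solution line)

-- ===== LEMMAS AND PROOFS =====

-- The counting loop of A computed componentwise.
theorem foldA (cs : List Char) : ∀ (x y z : Int),
    cs.foldl (fun (r : Int × Int × Int) item =>
      if item == 'a' then (r.1 + 1, r.2.1, r.2.2)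
      else if item == 'b' then (r.1, r.2.1 + 1, r.2.2)
      else (r.1, r.2.1, r.2.2 + 1)) (x, y, z)
    = (x + cs.count 'a', y + cs.count 'b',
       z + (cs.countP (fun c => !(c == 'a') && !(c == 'b')) : Int)) := by
  induction cs with
  | nil => simp
  | cons h t ih =>
    intro x y z
    simp only [beq_iff_eq] at ih ⊢
    simp only [List.foldl_cons]
    by_cases ha : h = 'a'
    · subst ha
      rw [if_pos rfl, ih]
      refine Prod.ext ?_ (Prod.ext ?_ ?_) <;>
        simp [List.count_cons, List.countP_cons] <;> push_cast <;> omega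
    · by_cases hb : h = 'b'
      · subst hb
        rw [if_neg ha, if_pos rfl, ih]
        refine Prod.ext ?_ (Prod.ext ?_ ?_) <;>
          simp [List.count_cons, List.countP_cons, ha] <;> push_cast <;> omega
      · rw [if_neg ha, if_neg hb, ih]
        refine Prod.ext ?_ (Prod.ext ?_ ?_) <;>
          simp [List.count_cons, List.countP_cons, ha, hb] <;> push_cast <;> omega

-- The normalisation map of B.
def normABC (ch : Char) : Char := if ch == 'a' then 'a' else if ch == 'b' then 'b' else 'c'

-- Sorting the normalised characters yields exactly the a-run, b-run, c-run of A.
theorem sorted_norm (cs : List Char) :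
    PySem.List.sorted (cs.map normABC) (fun x => x) false
      = List.replicate (cs.count 'a') 'a' ++ List.replicate (cs.count 'b') 'b'
          ++ List.replicate (cs.countP (fun c => !(c == 'a') && !(c == 'b'))) 'c' := by
  apply PySem.List.sorted_id_eq_of_perm_of_pairwise
  · -- the run concatenation is a permutation of the normalised list: equal counts everywhere
    rw [List.perm_iff_count]
    intro x
    have hm : (cs.map normABC).count x = cs.countP (fun c => normABC c == x) := by
      rw [List.count_eq_countP, List.countP_map]; rfl
    by_cases hxa : x = 'a'
    · subst hxa
      simp only [hm, List.count_append, List.count_replicate]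
      rw [show cs.countP (fun c => normABC c == 'a') = cs.count 'a' by
        rw [List.count_eq_countP]; apply List.countP_congr; intro c _
        simp only [normABC]
        by_cases h : c = 'a' <;> by_cases h' : c = 'b' <;> simp [h, h']]
      simp
    · by_cases hxb : x = 'b'
      · subst hxb
        simp only [hm, List.count_append, List.count_replicate]
        rw [show cs.countP (fun c => normABC c == 'b') = cs.count 'b' by
          rw [List.count_eq_countP]; apply List.countP_congr; intro c _
          simp only [normABC]; by_cases h : c = 'a' <;> by_cases h' : c = 'b' <;> simp [h, h']]
        simp
      · by_cases hxc : x = 'c'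
        · subst hxc
          simp only [hm, List.count_append, List.count_replicate]
          rw [show cs.countP (fun c => normABC c == 'c') =
                cs.countP (fun c => !(c == 'a') && !(c == 'b')) by
            apply List.countP_congr; intro c _
            simp only [normABC]; by_cases h : c = 'a' <;> by_cases h' : c = 'b' <;> simp [h, h']]
          simp
        · simp only [hm, List.count_append, List.count_replicate]
          rw [show cs.countP (fun c => normABC c == x) = 0 by
            rw [List.countP_eq_zero]; intro c _
            simp only [normABC]
            by_cases h : c = 'a' <;> by_cases h' : c = 'b' <;>
              simp [h, h', Ne.symm hxa, Ne.symm hxb, Ne.symm hxc]]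
          simp [Ne.symm hxa, Ne.symm hxb, Ne.symm hxc]
  · -- the run concatenation is ≤-sorted since 'a' ≤ 'b' ≤ 'c'
    rw [List.pairwise_append]
    refine ⟨?_, List.pairwise_replicate.mpr (by right; exact le_refl _), ?_⟩
    · rw [List.pairwise_append]
      refine ⟨List.pairwise_replicate.mpr (by right; exact le_refl _),
              List.pairwise_replicate.mpr (by right; exact le_refl _), ?_⟩
      intro a ha b hb
      rw [List.eq_of_mem_replicate ha, List.eq_of_mem_replicate hb]; decide
    · intro a ha b hb
      rw [List.eq_of_mem_replicate hb]
      rcases List.mem_append.mp ha with h | h <;> rw [List.eq_of_mem_replicate h] <;> decide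

-- ===== VERDICT (by name: the statement is the Claim_ definition above) =====
theorem solution_spec : Claim_equal_solution := by
  intro line _
  unfold Spec_solution solution solution_alt
  simp only [foldA, zero_add, PySem.List.pyRepeat_singleton]
  rw [show (fun ch => if ch == 'a' then 'a' else if ch == 'b' then 'b' else 'c') = normABC from rfl,
      sorted_norm]
  simp
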